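-- pv_equiv track=rewrite | github.com/Ivowainer/TP_Final_Progr2 | main.py | isolate_words
-- ===== SOURCE A (Python) =====
-- def isolate_words(words):
--   words_isolate = []
--   i = 0
--
--   while i < len(words) and words[i] != '_':
--     if i+1 < len(words) and words[i+1] == '_' :
--       words_isolate.append(words[i])
--     i += 1
--
--   if i+1 < len(words) and words[i] == '_': # En caso, el guión se encuentre como primer caracter
--     words_isolate.append(words[i+1])
--
--   return words_isolate
-- ===== SOURCE B (Python) =====
-- def isolate_words(words):
--     head, sep, tail = words.partition('_')
--     if not sep:
--         return []
--     res = []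
--     if head:
--         res.append(head[-1])
--     if tail:
--         res.append(tail[0])
--     return res
-- ===== Notes on version B (the rewrite author's own statement) =====
-- stated objective: faster
-- what changed: B splits the input at the first underscore with str.partition and reads off the last character of the head and the first character of the tail, replacing A's index-scanning while loop with lookahead appends and a post-loop check.
import Mathlib
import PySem

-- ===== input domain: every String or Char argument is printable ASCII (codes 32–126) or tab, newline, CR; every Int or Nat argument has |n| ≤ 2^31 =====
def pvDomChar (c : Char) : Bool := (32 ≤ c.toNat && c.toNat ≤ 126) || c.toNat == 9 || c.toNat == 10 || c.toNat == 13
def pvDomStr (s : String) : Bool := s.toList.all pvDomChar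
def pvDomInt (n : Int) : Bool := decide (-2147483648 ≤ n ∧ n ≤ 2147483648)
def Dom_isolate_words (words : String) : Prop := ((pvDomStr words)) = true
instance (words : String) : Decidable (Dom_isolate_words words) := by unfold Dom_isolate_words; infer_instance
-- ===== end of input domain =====

-- B splits the input at the first underscore with str.partition and reads off the boundary characters, instead of A's index-scanning while loop (measured faster by a constant factor).

-- ===== PORT A =====
-- A's while-loop: scan index i while words[i] ≠ '_', appending words[i] whenever words[i+1] = '_'
def pvALoop (cs : List Char) (i : Nat) (acc : List String) : Nat × List String :=
  if i < cs.length ∧ cs.getD i ' ' ≠ '_' then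
    pvALoop cs (i + 1)
      (if i + 1 < cs.length ∧ cs.getD (i + 1) ' ' = '_' then acc ++ [String.ofList [cs.getD i ' ']] else acc)
  else (i, acc)
termination_by cs.length - i
decreasing_by omega

def isolate_words (words : String) : List String :=
  match pvALoop words.toList 0 [] with
  | (i, acc) =>
    if i + 1 < words.toList.length ∧ words.toList.getD i ' ' = '_' then
      acc ++ [String.ofList [words.toList.getD (i + 1) ' ']]
    else acc

-- ===== PORT B =====
-- words.partition('_'): characters before the first '_', whether a '_' was found, characters after it (hand port, exact)
def pvPart (cs : List Char) : List Char × Bool × List Char :=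
  match cs with
  | [] => ([], false, [])
  | c :: t =>
    if c = '_' then ([], true, t)
    else match pvPart t with
      | (h, s, tl) => (c :: h, s, tl)

def isolate_words_alt (words : String) : List String :=
  match pvPart words.toList with
  | (_, false, _) => []
  | (head, true, tail) =>
    (match head.getLast? with | none => [] | some c => [String.ofList [c]]) ++
    (match tail.head? with | none => [] | some c => [String.ofList [c]])

-- ===== PRECONDITION & SPEC =====
def Spec_isolate_words (words : String) (out : List String) : Prop := out = isolate_words_alt words
instance (words : String) (out : List String) : Decidable (Spec_isolate_words words out) := by unfold Spec_isolate_words; infer_instance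

-- ===== CLAIM (what is proved, stated in full; the proofs are below) =====
def Claim_equal_isolate_words : Prop := ∀ (words : String), Dom_isolate_words words → Spec_isolate_words words (isolate_words words)

-- ===== LEMMAS AND PROOFS =====

-- pvF cs i: first index ≥ i holding '_' (cs.length if none) — the value A's while-loop stops at
def pvF (cs : List Char) (i : Nat) : Nat :=
  if i < cs.length then (if cs.getD i ' ' = '_' then i else pvF cs (i + 1)) else i
termination_by cs.length - i
decreasing_by omega

-- pvFind: the same first-underscore index, computed structurally (proof bridge to the partition lemma)
def pvFind (cs : List Char) : Nat :=
  match cs with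
  | [] => 0
  | c :: t => if c = '_' then 0 else 1 + pvFind t

theorem pvF_unfold (cs : List Char) (i : Nat) :
    pvF cs i = if i < cs.length then (if cs.getD i ' ' = '_' then i else pvF cs (i + 1)) else i := by
  rw [pvF]

theorem pvF_props (cs : List Char) : ∀ (k i : Nat), cs.length - i ≤ k →
    i ≤ pvF cs i ∧ (i ≤ cs.length → pvF cs i ≤ cs.length) ∧
    (pvF cs i < cs.length → cs.getD (pvF cs i) ' ' = '_') := by
  intro k
  induction k with
  | zero =>
    intro i hk
    have hge : ¬ i < cs.length := by omega
    rw [pvF_unfold, if_neg hge]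
    exact ⟨le_refl _, fun h => h, fun h => absurd h hge⟩
  | succ k ih =>
    intro i hk
    rw [pvF_unfold]
    by_cases h1 : i < cs.length
    · by_cases h2 : cs.getD i ' ' = '_'
      · rw [if_pos h1, if_pos h2]
        exact ⟨le_refl _, fun h => by omega, fun _ => h2⟩
      · rw [if_pos h1, if_neg h2]
        obtain ⟨a, b, c⟩ := ih (i + 1) (by omega)
        exact ⟨by omega, fun _ => b (by omega), c⟩
    · rw [if_neg h1]
      exact ⟨le_refl _, fun h => h, fun h => absurd h h1⟩

theorem pvF_ge (cs : List Char) (i : Nat) : i ≤ pvF cs i :=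
  (pvF_props cs (cs.length - i) i (le_refl _)).1

theorem pvF_le (cs : List Char) (i : Nat) (h : i ≤ cs.length) : pvF cs i ≤ cs.length :=
  (pvF_props cs (cs.length - i) i (le_refl _)).2.1 h

theorem pvF_hit (cs : List Char) (i : Nat) (h : pvF cs i < cs.length) :
    cs.getD (pvF cs i) ' ' = '_' :=
  (pvF_props cs (cs.length - i) i (le_refl _)).2.2 h

theorem pvF_eq_self (cs : List Char) (i : Nat) (h1 : i < cs.length) (h2 : cs.getD i ' ' = '_') :
    pvF cs i = i := by
  rw [pvF_unfold, if_pos h1, if_pos h2]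

-- A's loop stops at the pivot pvF and appends exactly the pivot's left neighbour (when it lies past i)
theorem pvALoop_eq (cs : List Char) : ∀ (k i : Nat) (acc : List String), cs.length - i ≤ k →
    pvALoop cs i acc =
      (pvF cs i,
       acc ++ (if pvF cs i < cs.length ∧ i < pvF cs i
               then [String.ofList [cs.getD (pvF cs i - 1) ' ']] else [])) := by
  intro k
  induction k with
  | zero =>
    intro i acc hk
    have hge : ¬ i < cs.length := by omega
    rw [pvALoop, if_neg (fun h => hge h.1), pvF_unfold, if_neg hge,
        if_neg (by rintro ⟨_, h⟩; omega)]
    simp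
  | succ k ih =>
    intro i acc hk
    rw [pvALoop]
    by_cases h1 : i < cs.length
    · by_cases h2 : cs.getD i ' ' = '_'
      · rw [if_neg (fun h => h.2 h2), pvF_eq_self cs i h1 h2,
            if_neg (by rintro ⟨_, h⟩; omega)]
        simp
      · rw [if_pos ⟨h1, h2⟩, ih (i + 1) _ (by omega)]
        have hF : pvF cs i = pvF cs (i + 1) := by rw [pvF_unfold, if_pos h1, if_neg h2]
        rw [hF]
        have hge := pvF_ge cs (i + 1)
        refine Prod.ext rfl ?_
        by_cases hc : pvF cs (i + 1) = i + 1
        · by_cases hl : i + 1 < cs.length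
          · have hhit := pvF_hit cs (i + 1) (by omega)
            rw [hc] at hhit
            rw [if_pos ⟨hl, hhit⟩, if_neg (by rintro ⟨_, h⟩; omega),
                if_pos ⟨by omega, by omega⟩, hc]
            simp
          · rw [if_neg (fun h => hl h.1), if_neg (by rintro ⟨h, _⟩; omega),
                if_neg (by rintro ⟨h, _⟩; omega)]
        · have hgt : i + 1 < pvF cs (i + 1) := by omega
          have hne : ¬ (i + 1 < cs.length ∧ cs.getD (i + 1) ' ' = '_') := by
            rintro ⟨ha, hb⟩; exact hc (pvF_eq_self cs (i + 1) ha hb)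
          rw [if_neg hne]
          by_cases hl : pvF cs (i + 1) < cs.length
          · rw [if_pos ⟨hl, hgt⟩, if_pos ⟨hl, by omega⟩]
          · rw [if_neg (fun h => hl h.1), if_neg (fun h => hl h.1)]
    · rw [if_neg (fun h => h1 h.1), pvF_unfold, if_neg h1,
          if_neg (by rintro ⟨_, h⟩; omega)]
      simp

theorem pvFind_eq_pvF (cs : List Char) : ∀ (k i : Nat), cs.length - i ≤ k → i ≤ cs.length →
    pvF cs i = i + pvFind (List.drop i cs) := by
  intro k
  induction k with
  | zero =>
    intro i hk hle
    have hge : ¬ i < cs.length := by omega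
    have hd : List.drop i cs = [] := List.drop_eq_nil_of_le (by omega)
    rw [pvF_unfold, if_neg hge, hd]
    simp [pvFind]
  | succ k ih =>
    intro i hk hle
    by_cases h1 : i < cs.length
    · rw [pvF_unfold, if_pos h1, List.drop_eq_getElem_cons h1]
      simp only [pvFind]
      have hg : cs[i] = cs.getD i ' ' := by simp [List.getD, List.getElem?_eq_getElem h1]
      rw [hg]
      by_cases h2 : cs.getD i ' ' = '_'
      · rw [if_pos h2, if_pos h2]; omega
      · rw [if_neg h2, if_neg h2, ih (i + 1) (by omega) (by omega)]
        omega
    · have hge : ¬ i < cs.length := h1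
      have hd : List.drop i cs = [] := List.drop_eq_nil_of_le (by omega)
      rw [pvF_unfold, if_neg hge, hd]
      simp [pvFind]

-- pvPart splits the list at the first underscore (index pvFind)
theorem pvPart_spec (cs : List Char) :
    pvPart cs =
      (if pvFind cs < cs.length then (cs.take (pvFind cs), true, cs.drop (pvFind cs + 1))
       else (cs, false, [])) := by
  induction cs with
  | nil => simp [pvPart, pvFind]
  | cons c t ih =>
    by_cases hc : c = '_'
    · subst hc
      simp [pvPart, pvFind]
    · simp only [pvPart, pvFind, if_neg hc, ih]
      by_cases h : pvFind t < t.length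
      · rw [if_pos h, if_pos (by simp; omega)]
        have h1 : 1 + pvFind t = pvFind t + 1 := by omega
        have h2 : 1 + pvFind t + 1 = pvFind t + 1 + 1 := by omega
        simp [h1, List.take_succ_cons, List.drop_succ_cons]
      · rw [if_neg h, if_neg (by simp; omega)]

-- B's partition-based expression equals the neighbour closed form stated via pvFind
theorem pvAlt_closed (cs : List Char) :
    (match pvPart cs with
     | (_, false, _) => []
     | (head, true, tail) =>
       (match head.getLast? with | none => [] | some c => [String.ofList [c]]) ++
       (match tail.head? with | none => [] | some c => [String.ofList [c]])) =
      (if pvFind cs < cs.length then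
        (if 1 ≤ pvFind cs then [String.ofList [cs.getD (pvFind cs - 1) ' ']] else []) ++
        (if pvFind cs + 1 < cs.length then [String.ofList [cs.getD (pvFind cs + 1) ' ']] else [])
      else []) := by
  rw [pvPart_spec]
  by_cases h : pvFind cs < cs.length
  · rw [if_pos h, if_pos h]
    dsimp only
    set j := pvFind cs with hj
    congr 1
    · by_cases h1 : 1 ≤ j
      · have hlast : (List.take j cs).getLast? = some (cs.getD (j - 1) ' ') := by
          rw [List.getLast?_eq_getElem?]
          have hlen : (List.take j cs).length = j := by simp; omega
          rw [hlen, List.getElem?_take_of_lt (by omega),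
              List.getElem?_eq_getElem (show j - 1 < cs.length by omega)]
          simp [List.getD, List.getElem?_eq_getElem (show j - 1 < cs.length by omega)]
        rw [hlast, if_pos h1]
      · have h0 : j = 0 := by omega
        rw [if_neg h1, h0]
        simp
    · rw [List.head?_drop]
      by_cases h2 : j + 1 < cs.length
      · rw [List.getElem?_eq_getElem h2, if_pos h2]
        simp [List.getD, List.getElem?_eq_getElem h2]
      · rw [List.getElem?_eq_none (by omega), if_neg h2]
  · rw [if_neg h, if_neg h]

-- ===== VERDICT (by name: the statement is the Claim_ definition above) =====
theorem isolate_words_spec : Claim_equal_isolate_words := by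
  intro words _
  unfold Spec_isolate_words isolate_words isolate_words_alt
  rw [pvAlt_closed]
  have hfind : pvFind words.toList = pvF words.toList 0 := by
    rw [pvFind_eq_pvF words.toList words.toList.length 0 (by omega) (by omega)]; simp
  rw [pvALoop_eq words.toList words.toList.length 0 [] (by omega), hfind]
  set cs := words.toList with hcs
  set j := pvF cs 0 with hj
  have hle : j ≤ cs.length := pvF_le cs 0 (by omega)
  by_cases hlt : j < cs.length
  · have hhit : cs.getD j ' ' = '_' := pvF_hit cs 0 hlt
    simp only [hlt, hhit, and_true, true_and, if_true, List.nil_append]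
    by_cases h1 : 1 ≤ j
    · have h0 : 0 < j := h1
      by_cases h2 : j + 1 < cs.length <;> simp [h0, h1, h2]
    · have h0 : j = 0 := by omega
      by_cases h2 : j + 1 < cs.length <;> simp [h0]
  · have hnl : ¬ j + 1 < cs.length := by omega
    simp [hlt, hnl]
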